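-- pv_equiv track=rewrite | github.com/JODA-Explore/JODA | docs/generateFuncDoc.py | mergeTypes
-- ===== SOURCE A (Python) =====
-- from typing import Any, Dict, List, Tuple
--
-- def mergeTypes(values: List[str]) -> str:
--     values = list(filter(lambda value: value is not None , values))
--     if len(values) == 0:
--         return "Any"
--     elif len(values) == 1:
--         return values[0]
--     else:
--         first = values[0]
--         rest = values[1:]
--         for value in rest:
--             if value != first:
--                 return "Any"
--         return first
-- ===== SOURCE B (Python) =====
-- def mergeTypes(values):
--     distinct = {v for v in values if v is not None}
--     if len(distinct) != 1:
--         return "Any"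
--     return next(iter(distinct))
-- ===== Notes on version B (the rewrite author's own statement) =====
-- stated objective: simpler
-- what changed: Replaces A's three-way length split with first/rest equality scan by building the set of distinct non-None values in one pass and returning its sole element if there is exactly one, else 'Any'.
import Mathlib
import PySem

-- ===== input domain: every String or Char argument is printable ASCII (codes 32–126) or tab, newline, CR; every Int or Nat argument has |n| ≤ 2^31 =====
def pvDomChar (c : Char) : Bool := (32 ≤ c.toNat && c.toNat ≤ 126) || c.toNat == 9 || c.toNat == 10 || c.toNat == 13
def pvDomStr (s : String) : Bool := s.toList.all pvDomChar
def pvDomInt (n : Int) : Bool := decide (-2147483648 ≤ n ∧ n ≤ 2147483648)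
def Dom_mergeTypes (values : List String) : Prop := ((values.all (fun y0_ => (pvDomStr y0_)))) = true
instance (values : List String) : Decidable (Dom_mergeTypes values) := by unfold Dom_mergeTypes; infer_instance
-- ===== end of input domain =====

-- B replaces A's first/rest early-exit equality scan by counting the distinct values
-- (a set built in one pass): simpler decomposition, same O(n) cost.

-- ===== PORT A =====
-- the for-loop over `rest`: first mismatch returns "Any", else `first`
def mergeTypesLoop (first : String) : List String → String
  | [] => first
  | v :: rest => if v ≠ first then "Any" else mergeTypesLoop first rest

def mergeTypes (values : List String) : String :=
  -- `filter(lambda value: value is not None, values)`: on List String every element is a str,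
  -- so the predicate is constantly true (None cannot occur under the type convention)
  let values := values.filter (fun _ => true)
  if values.length = 0 then "Any"
  else if values.length = 1 then values.headD ""
  else mergeTypesLoop (values.headD "") (values.drop 1)

-- ===== PORT B =====
def mergeTypes_alt (values : List String) : String :=
  -- `{v for v in values if v is not None}`: the guard is constantly true on List String
  let distinct := PySem.Set.ofList values
  if distinct.length ≠ 1 then "Any"
  -- `next(iter(distinct))` is consumed only when the set has exactly one element,
  -- so the (unmodelled) hash iteration order cannot matter
  else distinct.headD ""

-- ===== PRECONDITION & SPEC =====
def Spec_mergeTypes (values : List String) (out : String) : Prop := out = mergeTypes_alt values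
instance (values : List String) (out : String) : Decidable (Spec_mergeTypes values out) := by unfold Spec_mergeTypes; infer_instance

-- ===== CLAIM (what is proved, stated in full; the proofs are below) =====
def Claim_equal_mergeTypes : Prop := ∀ (values : List String), Dom_mergeTypes values → Spec_mergeTypes values (mergeTypes values)

-- ===== LEMMAS AND PROOFS =====
theorem loop_eq (rest : List String) (first : String) :
    mergeTypesLoop first rest = if rest.all (· == first) then first else "Any" := by
  induction rest with
  | nil => simp [mergeTypesLoop]
  | cons v rest ih =>
    simp only [mergeTypesLoop, List.all_cons]
    by_cases h : v = first
    · simp [h, ih]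
    · simp [h]

theorem foldl_add_const (xs : List String) (x : String) (h : xs.all (· == x)) :
    xs.foldl PySem.Set.add [x] = [x] := by
  induction xs with
  | nil => rfl
  | cons y ys ih =>
    simp only [List.all_cons, Bool.and_eq_true, beq_iff_eq] at h
    simp only [List.foldl_cons]
    have : PySem.Set.add [x] y = [x] := by
      simp [PySem.Set.add, PySem.Set.contains, h.1]
    rw [this]; exact ih h.2

theorem ofList_len_one_iff (x : String) (xs : List String) :
    (PySem.Set.ofList (x :: xs)).length = 1 ↔ xs.all (· == x) = true := by
  constructor
  · intro h
    rcases List.length_eq_one_iff.mp h with ⟨a, ha⟩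
    have hx : x ∈ PySem.Set.ofList (x :: xs) := (PySem.Set.mem_ofList _ _).mpr (by simp)
    rw [ha] at hx; simp at hx
    simp only [List.all_eq_true, beq_iff_eq]
    intro y hy
    have hym : y ∈ PySem.Set.ofList (x :: xs) :=
      (PySem.Set.mem_ofList _ _).mpr (by simp [hy])
    rw [ha] at hym; simp at hym
    rw [hym, ← hx]
  · intro h
    have : PySem.Set.ofList (x :: xs) = [x] := by
      rw [PySem.Set.ofList_eq_foldl]
      simp only [List.foldl_cons]
      have : PySem.Set.add [] x = [x] := rfl
      rw [show PySem.Set.add ([] : List String) x = [x] from rfl]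
      exact foldl_add_const xs x h
    rw [this]
    rfl

-- ===== VERDICT (by name: the statement is the Claim_ definition above) =====
theorem mergeTypes_spec : Claim_equal_mergeTypes := by
  intro values _
  unfold Spec_mergeTypes mergeTypes mergeTypes_alt
  simp only [List.filter_true]
  match values with
  | [] => rfl
  | [x] => rfl
  | x :: y :: rest =>
    simp only [List.length_cons, List.headD_cons, List.drop_succ_cons, List.drop_zero]
    rw [loop_eq]
    have hiff := ofList_len_one_iff x (y :: rest)
    by_cases h : (y :: rest).all (· == x) = true
    · have hlen : (PySem.Set.ofList (x :: y :: rest)).length = 1 := hiff.mpr h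
      have hset : PySem.Set.ofList (x :: y :: rest) = [x] := by
        rw [PySem.Set.ofList_eq_foldl]
        simp only [List.foldl_cons]
        rw [show PySem.Set.add ([] : List String) x = [x] from rfl]
        exact foldl_add_const _ x h
      simp [h, hset]
    · have hlen : (PySem.Set.ofList (x :: y :: rest)).length ≠ 1 := fun hc => h (hiff.mp hc)
      simp [h, hlen]
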